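-- pv_equiv track=rewrite | github.com/PinkR1ver/JudeW-Problemset | Leetcode/2751. Robot Collisions/test.py | get_sorted_index_array
-- ===== SOURCE A (Python) =====
-- def get_sorted_index_array(arr):
--     n = len(arr)
--     index_array = list(range(n))
--
--     def custom_partition(low, high):
--         i = low - 1
--         pivot = arr[index_array[high]]
--
--         for j in range(low, high):
--             if arr[index_array[j]] <= pivot:
--                 i += 1
--                 index_array[i], index_array[j] = index_array[j], index_array[i]
--
--         index_array[i + 1], index_array[high] = index_array[high], index_array[i + 1]
--         return i + 1
--
--     def custom_quicksort(low, high):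
--         if low < high:
--             pi = custom_partition(low, high)
--             custom_quicksort(low, pi - 1)
--             custom_quicksort(pi + 1, high)
--
--     custom_quicksort(0, n - 1)
--     return index_array
-- ===== SOURCE B (Python) =====
-- def get_sorted_index_array(arr):
--     index_array = list(range(len(arr)))
--     stack = [(0, len(arr) - 1)]
--     while stack:
--         low, high = stack.pop()
--         if low < high:
--             pivot = arr[index_array[high]]
--             i = low
--             for j in range(low, high):
--                 if arr[index_array[j]] <= pivot:
--                     index_array[i], index_array[j] = index_array[j], index_array[i]
--                     i += 1
--             index_array[i], index_array[high] = index_array[high], index_array[i]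
--             stack.append((i + 1, high))
--             stack.append((low, i - 1))
--     return index_array
-- ===== Notes on version B (the rewrite author's own statement) =====
-- stated objective: alternative
-- what changed: A's recursive quicksort (nested helper functions, recursion on sub-ranges) is replaced by a single iterative loop driving an explicit stack of (low, high) ranges, with the Lomuto partition inlined into the loop body and its boundary pointer shifted to a post-increment convention; the result, including tie ordering, is identical.
import Mathlib
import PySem

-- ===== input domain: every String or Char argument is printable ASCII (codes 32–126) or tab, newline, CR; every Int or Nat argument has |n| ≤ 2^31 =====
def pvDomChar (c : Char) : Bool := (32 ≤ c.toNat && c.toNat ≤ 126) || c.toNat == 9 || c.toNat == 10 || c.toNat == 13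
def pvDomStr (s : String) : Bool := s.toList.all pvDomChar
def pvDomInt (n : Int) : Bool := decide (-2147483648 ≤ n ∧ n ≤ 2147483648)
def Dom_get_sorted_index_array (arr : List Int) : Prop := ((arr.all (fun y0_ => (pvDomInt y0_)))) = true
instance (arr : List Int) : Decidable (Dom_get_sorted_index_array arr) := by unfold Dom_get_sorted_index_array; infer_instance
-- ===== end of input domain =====

-- B replaces A's recursive quicksort by an iterative one with an explicit stack of
-- (low, high) ranges and an inlined partition with a shifted boundary pointer
-- (objective: alternative decomposition, same result bit for bit).
-- All list indices reached by either program are provably in range (they come from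
-- range(n) and swaps of its entries), so `a[i]` / `a[i] = v` are ported with the total
-- forms pyGetD/pySetD (exact wherever Python does not raise).
-- Both recursions carry a Nat fuel that strictly exceeds the recursion depth /
-- iteration count actually reached (a totality guard only; it never changes the value).

-- ===== PORT A =====
-- `a[i], a[j] = a[j], a[i]`: read both, then assign both (exact for in-range i, j)
def pvSwapA (l : List Int) (i j : Int) : List Int :=
  let vi := PySem.List.pyGetD l i 0
  let vj := PySem.List.pyGetD l j 0
  PySem.List.pySetD (PySem.List.pySetD l i vj) j vi

-- the body of A's `for j in range(low, high)` loop; state = (i, index_array)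
def pvStepA (arr : List Int) (pivot : Int) (st : Int × List Int) (j : Int) : Int × List Int :=
  if PySem.List.pyGetD arr (PySem.List.pyGetD st.2 j 0) 0 ≤ pivot then
    (st.1 + 1, pvSwapA st.2 (st.1 + 1) j)
  else st

-- custom_partition: returns (pi, updated index_array)
def pvPartA (arr ia : List Int) (low high : Int) : Int × List Int :=
  let pivot := PySem.List.pyGetD arr (PySem.List.pyGetD ia high 0) 0
  let s := (PySem.List.pyRange low high 1).foldl (pvStepA arr pivot) (low - 1, ia)
  (s.1 + 1, pvSwapA s.2 (s.1 + 1) high)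

-- custom_quicksort (recursion on the segment, as in A; fuel > recursion depth)
def pvQsortA (arr : List Int) : Nat → List Int → Int → Int → List Int
  | 0, ia, _, _ => ia
  | fuel + 1, ia, low, high =>
    if low < high then
      let p := pvPartA arr ia low high
      pvQsortA arr fuel (pvQsortA arr fuel p.2 low (p.1 - 1)) (p.1 + 1) high
    else ia

def get_sorted_index_array (arr : List Int) : List Int :=
  pvQsortA arr (arr.length + 1) (PySem.List.pyRange 0 arr.length 1) 0 ((arr.length : Int) - 1)

-- ===== PORT B =====
def pvSwapB (l : List Int) (i j : Int) : List Int :=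
  let vi := PySem.List.pyGetD l i 0
  let vj := PySem.List.pyGetD l j 0
  PySem.List.pySetD (PySem.List.pySetD l i vj) j vi

-- the body of B's `for j in range(low, high)` loop; state = (i, index_array);
-- B swaps at the current i and increments afterwards
def pvStepB (arr : List Int) (pivot : Int) (st : Int × List Int) (j : Int) : Int × List Int :=
  if PySem.List.pyGetD arr (PySem.List.pyGetD st.2 j 0) 0 ≤ pivot then
    (st.1 + 1, pvSwapB st.2 st.1 j)
  else st

-- B's while loop; the Lean list holds the Python stack top first (append/pop at the
-- end of the Python list); fuel > number of loop iterations
def pvRunB (arr : List Int) : Nat → List Int → List (Int × Int) → List Int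
  | 0, ia, _ => ia
  | _ + 1, ia, [] => ia
  | fuel + 1, ia, (low, high) :: rest =>
    if low < high then
      let pivot := PySem.List.pyGetD arr (PySem.List.pyGetD ia high 0) 0
      let s := (PySem.List.pyRange low high 1).foldl (pvStepB arr pivot) (low, ia)
      let ia2 := pvSwapB s.2 s.1 high
      pvRunB arr fuel ia2 ((low, s.1 - 1) :: (s.1 + 1, high) :: rest)
    else pvRunB arr fuel ia rest

def get_sorted_index_array_alt (arr : List Int) : List Int :=
  pvRunB arr (2 * arr.length + 2) (PySem.List.pyRange 0 arr.length 1)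
    [(0, (arr.length : Int) - 1)]

-- ===== PRECONDITION & SPEC =====
def Spec_get_sorted_index_array (arr : List Int) (out : List Int) : Prop := out = get_sorted_index_array_alt arr
instance (arr : List Int) (out : List Int) : Decidable (Spec_get_sorted_index_array arr out) := by unfold Spec_get_sorted_index_array; infer_instance

-- ===== CLAIM (what is proved, stated in full; the proofs are below) =====
def Claim_equal_get_sorted_index_array : Prop := ∀ (arr : List Int), Dom_get_sorted_index_array arr → Spec_get_sorted_index_array arr (get_sorted_index_array arr)

-- ===== LEMMAS AND PROOFS =====

-- measure of a stack: twice the total size of its ranges plus its length;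
-- it strictly decreases at every iteration of B's loop
def pvM (st : List (Int × Int)) : Nat :=
  2 * (st.map (fun p => (p.2 - p.1 + 1).toNat)).sum + st.length

theorem pvStepA_fst (arr : List Int) (pivot : Int) (st : Int × List Int) (j : Int) :
    st.1 ≤ (pvStepA arr pivot st j).1 ∧ (pvStepA arr pivot st j).1 ≤ st.1 + 1 := by
  unfold pvStepA; split <;> simp

theorem pvFoldA_fst (arr : List Int) (pivot : Int) :
    ∀ (js : List Int) (st : Int × List Int),
      st.1 ≤ (js.foldl (pvStepA arr pivot) st).1 ∧
      (js.foldl (pvStepA arr pivot) st).1 ≤ st.1 + (js.length : Int) := by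
  intro js
  induction js with
  | nil => intro st; simp
  | cons j js ih =>
    intro st
    have h1 := pvStepA_fst arr pivot st j
    have h2 := ih (pvStepA arr pivot st j)
    simp only [List.foldl_cons, List.length_cons] at *
    push_cast
    omega

theorem pvPartA_fst_bounds (arr ia : List Int) (low high : Int) (h : low < high) :
    low ≤ (pvPartA arr ia low high).1 ∧ (pvPartA arr ia low high).1 ≤ high := by
  unfold pvPartA
  have hb := pvFoldA_fst arr (PySem.List.pyGetD arr (PySem.List.pyGetD ia high 0) 0)
      (PySem.List.pyRange low high 1) (low - 1, ia)
  simp only [PySem.List.length_pyRange_one] at hb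
  have : ((high - low).toNat : Int) = high - low := by omega
  simp only []
  omega

-- the two swap helpers have identical definitions
theorem pvSwap_eq (l : List Int) (i j : Int) : pvSwapB l i j = pvSwapA l i j := rfl

-- B's loop state is A's with the boundary pointer shifted by one
theorem pvStep_rel (arr : List Int) (pivot : Int) (i : Int) (l : List Int) (j : Int) :
    pvStepB arr pivot (i + 1, l) j
      = ((pvStepA arr pivot (i, l) j).1 + 1, (pvStepA arr pivot (i, l) j).2) := by
  unfold pvStepA pvStepB
  split <;> simp [pvSwap_eq]

theorem pvFold_rel (arr : List Int) (pivot : Int) :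
    ∀ (js : List Int) (i : Int) (l : List Int),
      List.foldl (pvStepB arr pivot) (i + 1, l) js
        = ((List.foldl (pvStepA arr pivot) (i, l) js).1 + 1,
           (List.foldl (pvStepA arr pivot) (i, l) js).2) := by
  intro js
  induction js with
  | nil => intro i l; simp
  | cons j js ih =>
    intro i l
    simp only [List.foldl_cons]
    rw [pvStep_rel]
    exact ih (pvStepA arr pivot (i, l) j).1 (pvStepA arr pivot (i, l) j).2

-- B's one stack step on (low, high) inlines exactly A's partition
theorem pvRunB_cons_eq (arr ia : List Int) (fuel : Nat) (low high : Int)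
    (rest : List (Int × Int)) (h : low < high) :
    pvRunB arr (fuel + 1) ia ((low, high) :: rest)
      = pvRunB arr fuel (pvPartA arr ia low high).2
          ((low, (pvPartA arr ia low high).1 - 1) :: ((pvPartA arr ia low high).1 + 1, high) :: rest) := by
  rw [pvRunB]
  simp only [if_pos h]
  have hl : ((low : Int), ia) = ((low - 1 : Int) + 1, ia) := by simp
  rw [hl, pvFold_rel]
  simp [pvPartA, pvSwap_eq]

-- the measure of a stack with a nonempty range on top, split out for omega
theorem pvM_cons (low high : Int) (rest : List (Int × Int)) :
    pvM ((low, high) :: rest) = 2 * (high - low + 1).toNat + 1 + pvM rest := by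
  simp only [pvM, List.map_cons, List.sum_cons, List.length_cons]
  omega

-- sufficient fuel never changes B's result
theorem pvRunB_fuel (arr : List Int) :
    ∀ (f g : Nat) (ia : List Int) (stack : List (Int × Int)),
      pvM stack < f → pvM stack < g → pvRunB arr f ia stack = pvRunB arr g ia stack := by
  intro f
  induction f with
  | zero => intro g ia stack hf; omega
  | succ f ihf =>
    intro g ia stack hf hg
    obtain ⟨g', rfl⟩ : ∃ k, g = k + 1 := ⟨g - 1, by omega⟩
    match stack with
    | [] => rfl
    | (low, high) :: rest =>
      rw [pvM_cons] at hf hg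
      by_cases h : low < high
      · rw [pvRunB_cons_eq arr ia f low high rest h,
          pvRunB_cons_eq arr ia g' low high rest h]
        have hb := pvPartA_fst_bounds arr ia low high h
        apply ihf
        · rw [pvM_cons, pvM_cons]; omega
        · rw [pvM_cons, pvM_cons]; omega
      · rw [pvRunB, pvRunB]
        simp only [if_neg h]
        exact ihf g' ia rest (by omega) (by omega)

-- popping one range off the stack runs A's quicksort on it (given sufficient fuel)
theorem pvRunB_qsortA (arr : List Int) (n : Nat) :
    ∀ (low high : Int), (high - low + 1).toNat ≤ n →
    ∀ (fa fb g : Nat) (ia : List Int) (rest : List (Int × Int)),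
      (high - low + 1).toNat < fa → pvM ((low, high) :: rest) < fb → pvM rest < g →
      pvRunB arr fb ia ((low, high) :: rest) = pvRunB arr g (pvQsortA arr fa ia low high) rest := by
  induction n using Nat.strong_induction_on with
  | _ n ih =>
    intro low high hn fa fb g ia rest hfa hfb hg
    obtain ⟨fa', rfl⟩ : ∃ k, fa = k + 1 := ⟨fa - 1, by omega⟩
    obtain ⟨fb', rfl⟩ : ∃ k, fb = k + 1 := ⟨fb - 1, by omega⟩
    rw [pvM_cons] at hfb
    by_cases h : low < high
    · have hb := pvPartA_fst_bounds arr ia low high h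
      rw [pvRunB_cons_eq arr ia fb' low high rest h]
      rw [ih (n - 1) (by omega) low ((pvPartA arr ia low high).1 - 1) (by omega) fa' fb'
            fb' (pvPartA arr ia low high).2 (((pvPartA arr ia low high).1 + 1, high) :: rest)
            (by omega) (by rw [pvM_cons, pvM_cons]; omega) (by rw [pvM_cons]; omega)]
      rw [ih (n - 1) (by omega) ((pvPartA arr ia low high).1 + 1) high (by omega) fa' fb' g
            _ rest (by omega) (by rw [pvM_cons]; omega) hg]
      rw [pvQsortA]
      simp only [if_pos h]
    · rw [pvRunB, pvQsortA]
      simp only [if_neg h]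
      exact pvRunB_fuel arr fb' g ia rest (by omega) hg

-- ===== VERDICT (by name: the statement is the Claim_ definition above) =====
theorem get_sorted_index_array_spec : Claim_equal_get_sorted_index_array := by
  intro arr _
  unfold Spec_get_sorted_index_array get_sorted_index_array get_sorted_index_array_alt
  rw [pvRunB_qsortA arr arr.length 0 ((arr.length : Int) - 1) (by omega)
        (arr.length + 1) (2 * arr.length + 2) 1 _ [] (by omega)
        (by simp [pvM]) (by simp [pvM])]
  rw [pvRunB]
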